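-- pv_equiv track=rewrite | github.com/apostolossvls/Python-University-Projects | digitsadd2_3.py | loop
-- ===== SOURCE A (Python) =====
-- def loop(s,start,dig,maxdig,c):
-- 	flag = 0
-- 	i=start
-- 	while i < 10 and flag==0:
-- 		if i==s:
-- 			flag=1
-- 		elif dig < maxdig:
-- 			c = loop(s-i,i+1,dig+1,maxdig,c)
-- 		i=i+1
-- 	if flag==1:
-- 		c=c+1
-- 	return c
-- ===== SOURCE B (Python) =====
-- def loop(s, start, dig, maxdig, c):
--     return c + _count(s, max(start, 0), max(1, maxdig - dig + 1))
--
-- def _count(s, start, k):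
--     # number of strictly increasing tuples of 1..k distinct digits from range(start, 10) summing to s
--     if start >= 10 or k <= 0:
--         return 0
--     n = 1 if s == start else 0
--     if k >= 2:
--         n += _count(s - start, start + 1, k - 1)
--     return n + _count(s, start + 1, k)
-- ===== Notes on version B (the rewrite author's own statement) =====
-- stated objective: alternative
-- what changed: A threads an accumulator c through a while-loop-with-break over the next digit, recursing per digit position; B computes the count once with a pure include/exclude subset recursion on the smallest candidate digit (length bounded by max(1, maxdig-dig+1)) and adds it to c.
-- outside the precondition, e.g. on loop(-2, -5, 0, 3, 0): A returns 49, B returns 0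
import Mathlib
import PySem

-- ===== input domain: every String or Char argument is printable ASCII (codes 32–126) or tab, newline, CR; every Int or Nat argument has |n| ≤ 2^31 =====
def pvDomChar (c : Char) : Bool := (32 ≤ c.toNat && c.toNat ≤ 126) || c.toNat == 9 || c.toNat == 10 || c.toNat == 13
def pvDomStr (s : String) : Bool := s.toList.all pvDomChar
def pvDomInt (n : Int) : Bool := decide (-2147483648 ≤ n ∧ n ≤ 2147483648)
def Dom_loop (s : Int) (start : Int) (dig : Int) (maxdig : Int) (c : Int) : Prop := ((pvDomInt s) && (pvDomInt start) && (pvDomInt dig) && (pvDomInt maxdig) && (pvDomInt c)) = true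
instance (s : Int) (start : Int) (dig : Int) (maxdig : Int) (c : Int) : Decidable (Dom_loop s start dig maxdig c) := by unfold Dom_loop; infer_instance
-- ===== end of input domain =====

-- B replaces A's accumulator-threading loop-with-break recursion by a pure
-- include/exclude subset-count recursion added once to c (objective: alternative, no speed claim).

-- ===== PORT A =====
-- Literal port of A: the while loop over i with the flag becomes loopGoF (state i, flag, c);
-- A's recursive call loop(s-i,i+1,dig+1,maxdig,c) is transcribed inline as the same restart of the
-- while loop at i+1 with flag 0 followed by A's final flag check.  The Nat `fuel` is only a
-- totality device (each step moves i up by 1, so (10 - i).toNat + 1 steps always suffice); it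
-- adds no algorithm switch: the 0-fuel branch is never reached from `loop`.
def loopGoF : Nat → Int → Int → Int → Int → Int → Int → Int × Int
  | 0, _, _, _, _, flag, c => (flag, c)
  | fuel + 1, s, dig, maxdig, i, flag, c =>
    if i < 10 ∧ flag = 0 then
      if i = s then loopGoF fuel s dig maxdig (i + 1) 1 c
      else if dig < maxdig then
        let r := loopGoF fuel (s - i) (dig + 1) maxdig (i + 1) 0 c
        loopGoF fuel s dig maxdig (i + 1) flag (if r.1 = 1 then r.2 + 1 else r.2)
      else loopGoF fuel s dig maxdig (i + 1) flag c
    else (flag, c)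

def loop (s : Int) (start : Int) (dig : Int) (maxdig : Int) (c : Int) : Int :=
  let r := loopGoF ((10 - start).toNat + 1) s dig maxdig start 0 c
  if r.1 = 1 then r.2 + 1 else r.2

-- ===== PORT B =====
-- Port of Source B's _count: include/exclude recursion on the smallest candidate digit; Source B clamps
-- start into the digit range with max(start, 0).  Same fuel device: every recursive call moves
-- start up by 1, so (10 - start).toNat + 1 suffices (≤ 11 after the clamp).
def loopCountF : Nat → Int → Int → Int → Int
  | 0, _, _, _ => 0
  | fuel + 1, s, start, k =>
    if 10 ≤ start ∨ k ≤ 0 then 0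
    else
      let n : Int := if s = start then 1 else 0
      let n := if 2 ≤ k then n + loopCountF fuel (s - start) (start + 1) (k - 1) else n
      n + loopCountF fuel s (start + 1) k

def loop_alt (s : Int) (start : Int) (dig : Int) (maxdig : Int) (c : Int) : Int :=
  c + loopCountF ((10 - max start 0).toNat + 1) s (max start 0) (max 1 (maxdig - dig + 1))

-- ===== PRECONDITION & SPEC =====
-- Pre_ excludes negative start: digits are 0..9, and for negative start A explores negative
-- "digit" values where its early break accidentally drops some matching tuples (and very
-- negative start exhausts Python's recursion stack); B counts them as ordinary values there.
def Pre_loop (s : Int) (start : Int) (dig : Int) (maxdig : Int) (c : Int) : Prop := 0 ≤ start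
instance (s : Int) (start : Int) (dig : Int) (maxdig : Int) (c : Int) : Decidable (Pre_loop s start dig maxdig c) := by unfold Pre_loop; infer_instance
def pvWitness_loop : Int × Int × Int × Int × Int := (10, 1, 0, 3, 0)
def Spec_loop (s : Int) (start : Int) (dig : Int) (maxdig : Int) (c : Int) (out : Int) : Prop := out = loop_alt s start dig maxdig c
instance (s : Int) (start : Int) (dig : Int) (maxdig : Int) (c : Int) (out : Int) : Decidable (Spec_loop s start dig maxdig c out) := by unfold Spec_loop; infer_instance

-- ===== CLAIM (what is proved, stated in full; the proofs are below) =====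
def Claim_equal_loop : Prop := ∀ (s : Int) (start : Int) (dig : Int) (maxdig : Int) (c : Int), Dom_loop s start dig maxdig c → Pre_loop s start dig maxdig c → Spec_loop s start dig maxdig c (loop s start dig maxdig c)

-- ===== LEMMAS AND PROOFS =====

-- loopCountF is 0 when the target is below every candidate value (any fuel).
theorem loopCountF_eq_zero : ∀ (fuel : ℕ) (s start k : Int), 0 ≤ start → s < start → loopCountF fuel s start k = 0 := by
  intro fuel
  induction fuel with
  | zero => intro s start k _ _; rfl
  | succ fuel ih =>
    intro s start k h0 hs
    show (if 10 ≤ start ∨ k ≤ 0 then (0:Int) else _) = 0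
    by_cases hst : (10:Int) ≤ start ∨ k ≤ 0
    · rw [if_pos hst]
    · rw [if_neg hst]
      have e1 : loopCountF fuel (s - start) (start + 1) (k - 1) = 0 := ih _ _ _ (by omega) (by omega)
      have e2 : loopCountF fuel s (start + 1) k = 0 := ih _ _ _ (by omega) (by omega)
      have hne : ¬ s = start := by omega
      simp [hne, e1, e2]

-- Once the flag is 1 the while loop exits immediately, whatever the fuel.
theorem loopGoF_flag1 : ∀ (fuel : ℕ) (s dig maxdig i c : Int), loopGoF fuel s dig maxdig i 1 c = (1, c) := by
  intro fuel s dig maxdig i c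
  cases fuel with
  | zero => rfl
  | succ fuel =>
    show (if i < 10 ∧ (1:Int) = 0 then _ else ((1:Int), c)) = ((1:Int), c)
    rw [if_neg (by omega)]

-- Characterisation of A's inner loop (flag = 0, 0 ≤ i, enough fuel): final count plus the flag
-- bonus equals c + loopCountF, the flag reporting exactly whether i ≤ s ≤ 9.
theorem loopGoF_char : ∀ (fuel : ℕ) (s dig maxdig i c : Int), (10 - i).toNat < fuel → 0 ≤ i →
    loopGoF fuel s dig maxdig i 0 c =
      ((if i ≤ s ∧ s ≤ 9 then (1:Int) else 0),
       c + loopCountF fuel s i (max 1 (maxdig - dig + 1)) - (if i ≤ s ∧ s ≤ 9 then 1 else 0)) := by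
  intro fuel
  induction fuel with
  | zero => intro s dig maxdig i c hf _; omega
  | succ fuel ih =>
    intro s dig maxdig i c hf h0
    by_cases h10 : (10:Int) ≤ i
    · -- loop body never entered
      have hφ : ¬ (i ≤ s ∧ s ≤ 9) := by omega
      have hz : loopCountF (fuel + 1) s i (max 1 (maxdig - dig + 1)) = 0 := by
        show (if 10 ≤ i ∨ _ then (0:Int) else _) = 0
        rw [if_pos (Or.inl h10)]
      show (if i < 10 ∧ (0:Int) = 0 then _ else ((0:Int), c)) = _
      rw [if_neg (by omega)]
      simp [hφ, hz]
    · have hi10 : i < 10 := by omega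
      have hf' : (10 - (i + 1)).toNat < fuel := by omega
      show (if i < 10 ∧ (0:Int) = 0 then _ else _) = _
      rw [if_pos ⟨hi10, rfl⟩]
      by_cases hes : i = s
      · -- break: flag becomes 1, loop exits; the one combination counted is the singleton {s}
        subst hes
        rw [if_pos rfl, loopGoF_flag1]
        have hφ : i ≤ i ∧ i ≤ 9 := by omega
        have hone : loopCountF (fuel + 1) i i (max 1 (maxdig - dig + 1)) = 1 := by
          show (if 10 ≤ i ∨ max 1 (maxdig - dig + 1) ≤ 0 then (0:Int) else _) = 1
          rw [if_neg (fun h => h.elim (by omega) (by omega))]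
          have e1 : loopCountF fuel 0 (i + 1) (max 1 (maxdig - dig + 1) - 1) = 0 :=
            loopCountF_eq_zero fuel _ _ _ (by omega) (by omega)
          have e2 : loopCountF fuel i (i + 1) (max 1 (maxdig - dig + 1)) = 0 :=
            loopCountF_eq_zero fuel _ _ _ (by omega) (by omega)
          by_cases h2 : (2:Int) ≤ max 1 (maxdig - dig + 1) <;> simp [h2, e1, e2]
        simp [hφ, hone]
      · rw [if_neg hes]
        have hφeq : (if i + 1 ≤ s ∧ s ≤ 9 then (1:Int) else 0) = (if i ≤ s ∧ s ≤ 9 then (1:Int) else 0) := by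
          by_cases hp : i + 1 ≤ s ∧ s ≤ 9
          · rw [if_pos hp, if_pos ⟨by omega, hp.2⟩]
          · have hp' : ¬ (i ≤ s ∧ s ≤ 9) := by
              intro ⟨h1, h2⟩; exact hp ⟨by omega, h2⟩
            rw [if_neg hp, if_neg hp']
        by_cases hdm : dig < maxdig
        · rw [if_pos hdm]
          -- the transcribed recursive call of A: inner loop restarted at i+1, then the flag fix
          have hinner : (if (loopGoF fuel (s - i) (dig + 1) maxdig (i + 1) 0 c).1 = 1
                then (loopGoF fuel (s - i) (dig + 1) maxdig (i + 1) 0 c).2 + 1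
                else (loopGoF fuel (s - i) (dig + 1) maxdig (i + 1) 0 c).2) =
              c + loopCountF fuel (s - i) (i + 1) (max 1 (maxdig - (dig + 1) + 1)) := by
            rw [ih (s - i) (dig + 1) maxdig (i + 1) c hf' (by omega)]
            by_cases hp : i + 1 ≤ s - i ∧ s - i ≤ 9
            · rw [if_pos hp]
              simp
            · rw [if_neg hp]
              simp
          show loopGoF fuel s dig maxdig (i + 1) 0
              (if (loopGoF fuel (s - i) (dig + 1) maxdig (i + 1) 0 c).1 = 1
                then (loopGoF fuel (s - i) (dig + 1) maxdig (i + 1) 0 c).2 + 1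
                else (loopGoF fuel (s - i) (dig + 1) maxdig (i + 1) 0 c).2) = _
          rw [hinner, ih s dig maxdig (i + 1) _ hf' (by omega), hφeq]
          have hcnt : loopCountF (fuel + 1) s i (max 1 (maxdig - dig + 1)) =
              loopCountF fuel (s - i) (i + 1) (max 1 (maxdig - (dig + 1) + 1)) +
              loopCountF fuel s (i + 1) (max 1 (maxdig - dig + 1)) := by
            show (if 10 ≤ i ∨ max 1 (maxdig - dig + 1) ≤ 0 then (0:Int) else _) = _
            rw [if_neg (fun h => h.elim (by omega) (by omega))]
            have h2 : (2:Int) ≤ max 1 (maxdig - dig + 1) := by omega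
            have hKm : max 1 (maxdig - dig + 1) - 1 = max 1 (maxdig - (dig + 1) + 1) := by omega
            simp [Ne.symm hes, h2, hKm]
          rw [hcnt]
          refine congrArg₂ Prod.mk rfl ?_
          ring
        · rw [if_neg hdm]
          rw [ih s dig maxdig (i + 1) c hf' (by omega), hφeq]
          have hcnt : loopCountF (fuel + 1) s i (max 1 (maxdig - dig + 1)) =
              loopCountF fuel s (i + 1) (max 1 (maxdig - dig + 1)) := by
            show (if 10 ≤ i ∨ max 1 (maxdig - dig + 1) ≤ 0 then (0:Int) else _) = _
            rw [if_neg (fun h => h.elim (by omega) (by omega))]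
            have h2 : ¬ (2:Int) ≤ max 1 (maxdig - dig + 1) := by omega
            simp [Ne.symm hes, h2]
          rw [hcnt]

theorem loop_char (s start dig maxdig c : Int) (h0 : 0 ≤ start) :
    loop s start dig maxdig c = c + loopCountF ((10 - start).toNat + 1) s start (max 1 (maxdig - dig + 1)) := by
  show (let r := loopGoF ((10 - start).toNat + 1) s dig maxdig start 0 c
        if r.1 = 1 then r.2 + 1 else r.2) = _
  rw [loopGoF_char ((10 - start).toNat + 1) s dig maxdig start c (by omega) h0]
  by_cases hp : start ≤ s ∧ s ≤ 9
  · rw [if_pos hp]; simp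
  · rw [if_neg hp]; simp

-- ===== VERDICT (by name: the statement is the Claim_ definition above) =====
theorem loop_spec : Claim_equal_loop := by
  intro s start dig maxdig c _ hpre
  unfold Spec_loop loop_alt
  have hm : max start 0 = start := by
    unfold Pre_loop at hpre; omega
  rw [hm]
  exact loop_char s start dig maxdig c hpre
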